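-- pv_equiv track=rewrite | github.com/yonkoma/fa-vision | general_pipeline.py | getRoughCuts
-- ===== SOURCE A (Python) =====
-- def getRoughCuts(size, cuts):
--     cut_list = [0]
--     location = 0
--     cut_count = 0
--     while cut_count < size % cuts:
--         location += size // cuts + 1
--         cut_list.append(location)
--         cut_count += 1
--     while cut_count < cuts:
--         location += size // cuts
--         cut_list.append(location)
--         cut_count += 1
--
--     return cut_list
-- ===== SOURCE B (Python) =====
-- def getRoughCuts(size, cuts):
--     base = size // cuts
--     rem = size % cuts
--     return [0] + [i * base + min(i, rem) for i in range(1, cuts + 1)]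
-- ===== Notes on version B (the rewrite author's own statement) =====
-- stated objective: simpler
-- what changed: Replaces the two accumulator while-loops (running location and cut_count) with an independent closed-form boundary i*(size//cuts)+min(i,size%cuts) per index, [0] plus a comprehension over range(1, cuts+1).
import Mathlib
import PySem

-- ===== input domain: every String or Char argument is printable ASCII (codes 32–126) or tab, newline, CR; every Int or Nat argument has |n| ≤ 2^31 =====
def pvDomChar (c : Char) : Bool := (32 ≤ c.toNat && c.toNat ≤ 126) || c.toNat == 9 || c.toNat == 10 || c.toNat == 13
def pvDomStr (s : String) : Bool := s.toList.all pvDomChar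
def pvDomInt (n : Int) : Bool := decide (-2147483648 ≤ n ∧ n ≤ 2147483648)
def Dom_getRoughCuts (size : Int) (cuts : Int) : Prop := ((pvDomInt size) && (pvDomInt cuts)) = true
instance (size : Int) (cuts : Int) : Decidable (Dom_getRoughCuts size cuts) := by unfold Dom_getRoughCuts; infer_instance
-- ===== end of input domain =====

-- B replaces A's two accumulator while-loops with an independent closed-form boundary per index (objective: simpler).

-- ===== PORT A =====
-- each while loop ported with its remaining-iteration count as fuel; every step adds `step`
-- to `location` and appends it, exactly as A does
def pvALoop (step : Int) : Nat → Int → List Int → Int × List Int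
  | 0, location, acc => (location, acc)
  | n + 1, location, acc =>
      let location' := location + step
      pvALoop step n location' (acc ++ [location'])

def getRoughCuts (size : Int) (cuts : Int) : List Int :=
  -- first loop: runs while cut_count < size % cuts, i.e. (size % cuts).toNat times
  let r := PySem.Int.mod size cuts
  let q := PySem.Int.floordiv size cuts
  let s1 := pvALoop (q + 1) r.toNat 0 [0]
  -- second loop: cut_count is now max(r,0); runs while cut_count < cuts
  let s2 := pvALoop q (cuts - (r.toNat : Int)).toNat s1.1 s1.2
  s2.2

-- ===== PORT B =====
def getRoughCuts_alt (size : Int) (cuts : Int) : List Int :=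
  let base := PySem.Int.floordiv size cuts
  let rem := PySem.Int.mod size cuts
  0 :: (PySem.List.pyRange 1 (cuts + 1) 1).map (fun i => i * base + min i rem)

-- ===== PRECONDITION & SPEC =====
-- Pre_ excludes exactly cuts = 0, where both A and B raise ZeroDivisionError (size % 0 / size // 0).
def Pre_getRoughCuts (size : Int) (cuts : Int) : Prop := cuts ≠ 0
instance (size : Int) (cuts : Int) : Decidable (Pre_getRoughCuts size cuts) := by unfold Pre_getRoughCuts; infer_instance
def pvWitness_getRoughCuts : Int × Int := (17, 5)

def Spec_getRoughCuts (size : Int) (cuts : Int) (out : List Int) : Prop := out = getRoughCuts_alt size cuts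
instance (size : Int) (cuts : Int) (out : List Int) : Decidable (Spec_getRoughCuts size cuts out) := by unfold Spec_getRoughCuts; infer_instance

-- ===== CLAIM (what is proved, stated in full; the proofs are below) =====
def Claim_equal_getRoughCuts : Prop := ∀ (size : Int) (cuts : Int), Dom_getRoughCuts size cuts → Pre_getRoughCuts size cuts → Spec_getRoughCuts size cuts (getRoughCuts size cuts)

-- ===== LEMMAS AND PROOFS =====

theorem pvALoop_spec (step : Int) :
    ∀ (n : Nat) (location : Int) (acc : List Int),
      pvALoop step n location acc
        = (location + n * step,
           acc ++ (List.range n).map (fun (k : Nat) => location + ((k : Int) + 1) * step)) := by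
  intro n
  induction n with
  | zero => intro location acc; simp [pvALoop]
  | succ m ih =>
      intro location acc
      rw [pvALoop, ih]
      simp only [Prod.mk.injEq]
      constructor
      · push_cast; ring
      · rw [List.range_succ_eq_map]
        simp only [List.map_cons, List.map_map, List.append_assoc, List.cons_append,
                   List.nil_append]
        rw [List.append_right_inj]
        congr 1
        · push_cast; ring
        · apply List.map_congr_left
          intro k _
          simp only [Function.comp_apply]
          push_cast; ring

theorem getRoughCuts_spec : Claim_equal_getRoughCuts := by
  intro size cuts _ hpre
  have hc0 : cuts ≠ 0 := hpre
  unfold Spec_getRoughCuts getRoughCuts getRoughCuts_alt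
  rcases lt_or_gt_of_ne hc0 with hneg | hc
  · -- cuts < 0: both loops run zero times in A; B's range 1..cuts+1 is empty
    have hm := PySem.Int.mod_neg_bounds size hneg
    have h1 : (PySem.Int.mod size cuts).toNat = 0 := by omega
    have h2 : cuts.toNat = 0 := by omega
    rw [PySem.List.pyRange_one_eq_nil (by omega)]
    simp only [h1, Nat.cast_zero, sub_zero, h2, pvALoop, List.map_nil]
  · -- cuts > 0: the generic case
    set q := PySem.Int.floordiv size cuts with hq
    set r := PySem.Int.mod size cuts with hr
    have hr0 : 0 ≤ r := PySem.Int.mod_nonneg size hc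
    have hrlt : r < cuts := PySem.Int.mod_lt size hc
    -- natural-number views
    obtain ⟨R, hR⟩ : ∃ R : Nat, r = (R : Int) := ⟨r.toNat, (Int.toNat_of_nonneg hr0).symm⟩
    obtain ⟨C, hC⟩ : ∃ C : Nat, cuts = (C : Int) := ⟨cuts.toNat, (Int.toNat_of_nonneg hc.le).symm⟩
    have hRC : R < C := by exact_mod_cast hR ▸ hC ▸ hrlt
    simp only [pvALoop_spec]
    have htn1 : r.toNat = R := by rw [hR]; exact Int.toNat_natCast R
    have htn2 : (cuts - ((R : Nat) : Int)).toNat = C - R := by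
      rw [hC]; omega
    rw [htn1, htn2]
    -- right side: range of ints 1..cuts
    rw [PySem.List.pyRange_one]
    have hb : (cuts + 1 - 1).toNat = C := by rw [hC]; omega
    rw [hb]
    simp only [List.map_map]
    -- split C = R + (C-R)
    have hsplit : C = R + (C - R) := by omega
    rw [hsplit, List.range_add, List.map_append]
    simp only [List.map_map, Function.comp_def, List.cons_append, List.nil_append,
               List.append_assoc]
    rw [show R + (C - R) - R = C - R from by omega]
    congr 1
    congr 1
    · -- first loop's entries: indices 1..R, min i r = i
      apply List.map_congr_left
      intro k hk
      rw [List.mem_range] at hk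
      rw [min_eq_left (by rw [hR]; push_cast; omega)]
      push_cast; ring
    · -- second loop's entries: indices R+1..C, min i r = r
      apply List.map_congr_left
      intro k hk
      rw [min_eq_right (by rw [hR]; push_cast; omega)]
      rw [hR]; push_cast; ring
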